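-- pv_equiv track=rewrite | github.com/ccropper/ls-py110 | lesson_1/adjacent_consonants.py | count_max_adjacent_consonants
-- ===== SOURCE A (Python) =====
-- def is_consonant(char):
--     return char in set("bcdfghjklmnpqrstvwxyz")
--
-- def count_max_adjacent_consonants(str):
--     str = str.replace(" ", "")
--     consecutive_consonants = ""
--     max_consecutive_consonants = 0
--
--     for char in str:
--         if is_consonant(char):
--             consecutive_consonants += char
--             if (
--                 len(consecutive_consonants) > 1
--                 and len(consecutive_consonants) > max_consecutive_consonants
--             ):
--                 max_consecutive_consonants = len(consecutive_consonants)
--         else: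
--             if (
--                 len(consecutive_consonants) > 1
--                 and len(consecutive_consonants) > max_consecutive_consonants
--             ):
--                 max_consecutive_consonants = len(consecutive_consonants)
--             consecutive_consonants = ""
--
--     return max_consecutive_consonants
-- ===== SOURCE B (Python) =====
-- def count_max_adjacent_consonants(str):
--     consonants = set("bcdfghjklmnpqrstvwxyz")
--     rest = str.replace(" ", "")
--     best = 0
--     while rest:
--         if rest[0] in consonants:
--             run = 0
--             while rest and rest[0] in consonants:
--                 run += 1
--                 rest = rest[1:]
--             if run > best:
--                 best = run
--         else:
--             rest = rest[1:]
--     return best if best > 1 else 0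
-- ===== Notes on version B (the rewrite author's own statement) =====
-- stated objective: alternative
-- what changed: B replaces A's character-by-character scan that grows an accumulator string and updates the max inside the loop (with a >1 guard at every step) by a skip-runs loop: consume each maximal consonant run in one inner loop, keep the plain max of run lengths, and apply the >1 threshold once at the end.
import Mathlib
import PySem

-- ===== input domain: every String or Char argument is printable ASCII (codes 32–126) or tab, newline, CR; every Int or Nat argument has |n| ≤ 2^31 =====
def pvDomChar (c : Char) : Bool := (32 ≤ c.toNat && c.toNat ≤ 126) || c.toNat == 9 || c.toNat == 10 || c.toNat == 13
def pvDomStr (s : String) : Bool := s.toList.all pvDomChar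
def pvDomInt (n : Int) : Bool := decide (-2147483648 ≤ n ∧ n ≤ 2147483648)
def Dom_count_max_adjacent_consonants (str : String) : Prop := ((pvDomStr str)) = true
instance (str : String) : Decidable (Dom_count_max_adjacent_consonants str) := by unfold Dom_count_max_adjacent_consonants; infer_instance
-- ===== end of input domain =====

-- B replaces A's grow-a-string-and-update-max-inside-the-loop scan with a skip-runs loop
-- (consume each whole consonant run at once, take the max of run lengths, threshold once at
-- the end); objective: alternative decomposition, no speed claim.

-- ===== PORT A =====
def is_consonant (char : Char) : Bool :=
  (PySem.Set.ofList "bcdfghjklmnpqrstvwxyz".toList).contains char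

def count_max_adjacent_consonants (str : String) : Int :=
  let s := PySem.Str.replace str " " ""
  let st := s.toList.foldl
    (fun (st : List Char × Int) char =>
      let cc := st.1
      let mx := st.2
      if is_consonant char then
        let cc := cc ++ [char]
        if 1 < cc.length ∧ mx < (cc.length : Int) then (cc, (cc.length : Int)) else (cc, mx)
      else
        if 1 < cc.length ∧ mx < (cc.length : Int) then ([], (cc.length : Int)) else ([], mx))
    ([], 0)
  st.2

-- ===== PORT B =====
-- inner while loop of Source B: consume consonants from the front, counting them
def bInner (rest : List Char) (run : Nat) : Nat × List Char :=
  match rest with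
  | [] => (run, [])
  | c :: t => if is_consonant c then bInner t (run + 1) else (run, c :: t)

theorem bInner_len (rest : List Char) (run : Nat) : (bInner rest run).2.length ≤ rest.length := by
  induction rest generalizing run with
  | nil => simp [bInner]
  | cons c t ih =>
    simp only [bInner]
    split
    · exact le_trans (ih _) (Nat.le_succ _)
    · simp

-- outer while loop of Source B
def bOuter (rest : List Char) (best : Int) : Int :=
  match rest with
  | [] => best
  | c :: t =>
    if is_consonant c then
      let p := bInner t 1
      bOuter p.2 (if (p.1 : Int) > best then (p.1 : Int) else best)
    else bOuter t best
termination_by rest.length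
decreasing_by
  · exact Nat.lt_succ_of_le (bInner_len t 1)
  · simp

def count_max_adjacent_consonants_alt (str : String) : Int :=
  let rest := PySem.Str.replace str " " ""
  let best := bOuter rest.toList 0
  if best > 1 then best else 0

-- ===== PRECONDITION & SPEC =====
def Spec_count_max_adjacent_consonants (str : String) (out : Int) : Prop := out = count_max_adjacent_consonants_alt str
instance (str : String) (out : Int) : Decidable (Spec_count_max_adjacent_consonants str out) := by unfold Spec_count_max_adjacent_consonants; infer_instance

-- ===== CLAIM (what is proved, stated in full; the proofs are below) =====
def Claim_equal_count_max_adjacent_consonants : Prop := ∀ (str : String), Dom_count_max_adjacent_consonants str → Spec_count_max_adjacent_consonants str (count_max_adjacent_consonants str)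

-- ===== LEMMAS AND PROOFS =====

-- abstract form of A's fold: only the length of the accumulated run string matters
def natFold (cs : List Char) (k : Nat) (m : Int) : Int :=
  match cs with
  | [] => m
  | c :: t =>
    if is_consonant c then
      natFold t (k + 1) (if 1 < k + 1 ∧ m < ((k + 1 : Nat) : Int) then ((k + 1 : Nat) : Int) else m)
    else
      natFold t 0 (if 1 < k ∧ m < (k : Int) then (k : Int) else m)

-- reference: max over the run containing the current position (length so far k) and later runs
def maxRunFrom (cs : List Char) (k : Nat) : Nat :=
  match cs with
  | [] => k
  | c :: t => if is_consonant c then maxRunFrom t (k + 1) else max k (maxRunFrom t 0)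

def thr (k : Nat) : Int := if 1 < k then (k : Int) else 0

theorem le_maxRunFrom (cs : List Char) (k : Nat) : k ≤ maxRunFrom cs k := by
  induction cs generalizing k with
  | nil => simp [maxRunFrom]
  | cons c t ih =>
    simp only [maxRunFrom]
    split
    · exact le_trans (Nat.le_succ k) (ih _)
    · exact Nat.le_max_left _ _

theorem thr_mono {a b : Nat} (h : a ≤ b) : thr a ≤ thr b := by
  simp only [thr]; split_ifs <;> omega

theorem thr_max (a b : Nat) : thr (max a b) = max (thr a) (thr b) := by
  simp only [thr]
  rcases Nat.le_total a b with h | h <;> split_ifs <;> simp_all <;> omega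

theorem thr_nonneg (k : Nat) : 0 ≤ thr k := by simp only [thr]; split_ifs <;> omega

-- A's fold, given the invariant thr k ≤ m, computes max m (thr (maxRunFrom cs k))
theorem natFold_eq (cs : List Char) (k : Nat) (m : Int) (h : thr k ≤ m) :
    natFold cs k m = max m (thr (maxRunFrom cs k)) := by
  induction cs generalizing k m with
  | nil =>
    simp only [natFold, maxRunFrom]
    omega
  | cons c t ih =>
    simp only [natFold, maxRunFrom]
    split
    · -- consonant
      set m' := if 1 < k + 1 ∧ m < ((k + 1 : Nat) : Int) then ((k + 1 : Nat) : Int) else m with hm'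
      have h1 : thr (k + 1) ≤ m' := by
        simp only [hm', thr] at *; split_ifs <;> push_cast <;> omega
      rw [ih (k + 1) m' h1]
      have hX : thr (k + 1) ≤ thr (maxRunFrom t (k + 1)) := thr_mono (le_maxRunFrom t (k + 1))
      have hm'' : m' = max m (thr (k + 1)) := by
        simp only [hm', thr] at *; split_ifs <;> push_cast at * <;> omega
      rw [hm'']
      omega
    · -- not a consonant
      set m' := if 1 < k ∧ m < (k : Int) then (k : Int) else m with hm'
      have h1 : thr 0 ≤ m' := by
        simp only [hm', thr] at *; split_ifs <;> omega
      rw [ih 0 m' h1]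
      have hm'' : m' = max m (thr k) := by
        simp only [hm', thr] at *; split_ifs <;> omega
      rw [hm'', thr_max]
      omega

-- A's step function, named so the fold lemma can be stated about it (defeq to the port's lambda)
def stepA (st : List Char × Int) (char : Char) : List Char × Int :=
  let cc := st.1
  let mx := st.2
  if is_consonant char then
    let cc := cc ++ [char]
    if 1 < cc.length ∧ mx < (cc.length : Int) then (cc, (cc.length : Int)) else (cc, mx)
  else
    if 1 < cc.length ∧ mx < (cc.length : Int) then ([], (cc.length : Int)) else ([], mx)

-- A's real fold equals natFold (only the length of the accumulator is used)
theorem foldA_eq (cs : List Char) (cc : List Char) (m : Int) :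
    (cs.foldl stepA (cc, m)).2 = natFold cs cc.length m := by
  induction cs generalizing cc m with
  | nil => simp [natFold]
  | cons c t ih =>
    simp only [List.foldl_cons, natFold]
    have hlen : (cc ++ [c]).length = cc.length + 1 := by simp
    by_cases hc : is_consonant c
    · simp only [hc, if_true]
      by_cases h : 1 < cc.length + 1 ∧ m < ((cc.length + 1 : Nat) : Int)
      · have hs : stepA (cc, m) c = (cc ++ [c], ((cc.length + 1 : Nat) : Int)) := by
          simp only [stepA, hc, if_true, hlen]
          rw [if_pos h]
        rw [hs, if_pos h, ih, hlen]
      · have hs : stepA (cc, m) c = (cc ++ [c], m) := by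
          simp only [stepA, hc, if_true, hlen]
          rw [if_neg h]
        rw [hs, if_neg h, ih, hlen]
    · simp only [hc, Bool.false_eq_true, if_false]
      by_cases h : 1 < cc.length ∧ m < (cc.length : Int)
      · have hs : stepA (cc, m) c = ([], (cc.length : Int)) := by
          simp only [stepA, hc, Bool.false_eq_true, if_false]
          rw [if_pos h]
        rw [hs, if_pos h, ih]
        rfl
      · have hs : stepA (cc, m) c = ([], m) := by
          simp only [stepA, hc, Bool.false_eq_true, if_false]
          rw [if_neg h]
        rw [hs, if_neg h, ih]
        rfl

-- bInner consumes exactly the leading consonant run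
theorem bInner_eq (cs : List Char) (r : Nat) :
    bInner cs r = (r + (cs.takeWhile is_consonant).length, cs.dropWhile is_consonant) := by
  induction cs generalizing r with
  | nil => simp [bInner]
  | cons c t ih =>
    simp only [bInner, List.takeWhile_cons, List.dropWhile_cons]
    rcases hc : is_consonant c with _ | _
    · simp
    · simp [ih]; omega

-- peeling the leading run off maxRunFrom
theorem maxRunFrom_peel (cs : List Char) (k : Nat) :
    maxRunFrom cs k =
      max (k + (cs.takeWhile is_consonant).length) (maxRunFrom (cs.dropWhile is_consonant) 0) := by
  induction cs generalizing k with
  | nil => simp [maxRunFrom]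
  | cons c t ih =>
    simp only [maxRunFrom, List.takeWhile_cons, List.dropWhile_cons]
    rcases hc : is_consonant c with _ | _
    · simp only [Bool.false_eq_true, if_false]
      simp only [maxRunFrom, hc, Bool.false_eq_true, if_false, List.length_nil]
      omega
    · simp only [if_true, List.length_cons, ih (k + 1)]
      omega

-- B's outer loop computes max best (maxRunFrom cs 0)
theorem bOuter_eq (cs : List Char) (best : Int) (h : 0 ≤ best) :
    bOuter cs best = max best ((maxRunFrom cs 0 : Nat) : Int) := by
  induction hn : cs.length using Nat.strong_induction_on generalizing cs best with
  | _ n ih =>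
  match cs with
  | [] => simp [bOuter, maxRunFrom]; omega
  | c :: t =>
    simp only [bOuter]
    rcases hc : is_consonant c with _ | _
    · simp only [Bool.false_eq_true, if_false]
      have ht : t.length < n := by simp [← hn]
      rw [ih t.length ht t best h rfl]
      simp only [maxRunFrom, hc, Bool.false_eq_true, if_false]
      omega
    · simp only [if_true]
      rw [bInner_eq]
      have hlen : (t.dropWhile is_consonant).length < n := by
        have := List.length_dropWhile_le is_consonant t
        simp [← hn]; omega
      set run : Nat := 1 + (t.takeWhile is_consonant).length with hrun
      set best' : Int := if (run : Int) > best then (run : Int) else best with hb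
      have hb0 : 0 ≤ best' := by rw [hb]; split_ifs <;> omega
      rw [ih _ hlen _ best' hb0 rfl]
      have : maxRunFrom (c :: t) 0 = max run (maxRunFrom (t.dropWhile is_consonant) 0) := by
        simp only [maxRunFrom, hc, if_true, Nat.zero_add]
        rw [maxRunFrom_peel t 1]
      rw [this]
      simp only [hb]
      push_cast
      split_ifs <;> omega

-- ===== VERDICT (by name: the statement is the Claim_ definition above) =====
theorem count_max_adjacent_consonants_spec : Claim_equal_count_max_adjacent_consonants := by
  intro str _
  unfold Spec_count_max_adjacent_consonants
  have hA : count_max_adjacent_consonants str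
      = natFold (PySem.Str.replace str " " "").toList 0 0 :=
    foldA_eq (PySem.Str.replace str " " "").toList [] 0
  have hB : count_max_adjacent_consonants_alt str
      = (if bOuter (PySem.Str.replace str " " "").toList 0 > 1
          then bOuter (PySem.Str.replace str " " "").toList 0 else 0) := rfl
  rw [hA, hB, natFold_eq _ _ _ (by simp [thr]), bOuter_eq _ 0 le_rfl]
  have h0 := thr_nonneg (maxRunFrom (PySem.Str.replace str " " "").toList 0)
  simp only [thr] at *
  split_ifs at * <;> omega
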